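-- pv_equiv track=rewrite | github.com/Aaandria/GOA-Homework | day 42/homework/homewokr04.py | capitals_first
-- ===== SOURCE A (Python) =====
-- def capitals_first(string):
--     words = string.split()
--     st1 = []
--     st2 = []
--     for word in words:
--         if word[0].isalpha():
--             if word[0].isupper():
--                 st1.append(word)
--             else:
--                 st2.append(word)
--     return " ".join(st1 + st2)
-- ===== SOURCE B (Python) =====
-- def capitals_first(string):
--     words = [w for w in string.split() if w[0].isalpha()]
--     return " ".join(sorted(words, key=lambda w: 0 if w[0].isupper() else 1))
-- ===== Notes on version B (the rewrite author's own statement) =====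
-- stated objective: idiomatic
-- what changed: Replaces the explicit two-bucket partition loop with a filter comprehension plus one stable sort on a binary key (0 for capital-initial, 1 for lowercase-initial), relying on sort stability to preserve within-group order.
import Mathlib
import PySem

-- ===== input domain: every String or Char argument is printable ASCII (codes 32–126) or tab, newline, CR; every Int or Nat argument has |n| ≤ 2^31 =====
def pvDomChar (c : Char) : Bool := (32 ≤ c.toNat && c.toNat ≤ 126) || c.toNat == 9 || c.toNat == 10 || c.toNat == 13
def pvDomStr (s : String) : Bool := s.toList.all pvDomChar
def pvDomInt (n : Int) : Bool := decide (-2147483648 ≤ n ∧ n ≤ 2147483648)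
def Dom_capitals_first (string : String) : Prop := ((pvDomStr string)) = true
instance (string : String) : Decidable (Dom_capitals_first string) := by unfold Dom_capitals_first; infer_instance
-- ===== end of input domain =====

-- B replaces A's explicit two-bucket partition loop with a filter plus one stable sort
-- on a binary key (idiomatic; within-group order preserved by sort stability).


-- ===== PORT A =====
-- word[0] on a word from str.split() is its first character (split words are nonempty;
-- the [] branch is unreachable and keeps the accumulator unchanged).
def capitals_first (string : String) : String :=
  let words := PySem.Str.split₀ string
  let p := words.foldl (fun (acc : List String × List String) word =>
      match word.toList with
      | [] => acc
      | c :: _ =>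
        if PySem.Chars.isalpha c then
          if PySem.Chars.isupper c then (acc.1 ++ [word], acc.2)
          else (acc.1, acc.2 ++ [word])
        else acc) ([], [])
  PySem.Str.join " " (p.1 ++ p.2)

-- ===== PORT B =====
-- w[0].isalpha() filter of Source B (words from split() are nonempty; [] gives false)
def pvAlphaFirst (w : String) : Bool :=
  match w.toList with
  | [] => false
  | c :: _ => PySem.Chars.isalpha c

-- Source B's sort key: 0 if w[0].isupper() else 1
def pvKey (w : String) : Int :=
  match w.toList with
  | [] => 1
  | c :: _ => if PySem.Chars.isupper c then 0 else 1

def capitals_first_alt (string : String) : String :=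
  let words := (PySem.Str.split₀ string).filter pvAlphaFirst
  PySem.Str.join " " (PySem.List.sorted words pvKey)

-- ===== PRECONDITION & SPEC =====
def Spec_capitals_first (string : String) (out : String) : Prop := out = capitals_first_alt string
instance (string : String) (out : String) : Decidable (Spec_capitals_first string out) := by unfold Spec_capitals_first; infer_instance

-- ===== CLAIM (what is proved, stated in full; the proofs are below) =====
def Claim_equal_capitals_first : Prop := ∀ (string : String), Dom_capitals_first string → Spec_capitals_first string (capitals_first string)

-- ===== LEMMAS AND PROOFS =====

-- the partition predicates A's loop implements
def pvUp (w : String) : Bool :=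
  match w.toList with
  | [] => false
  | c :: _ => PySem.Chars.isalpha c && PySem.Chars.isupper c

def pvLow (w : String) : Bool :=
  match w.toList with
  | [] => false
  | c :: _ => PySem.Chars.isalpha c && !PySem.Chars.isupper c

theorem pvKey_zero_or_one (w : String) : pvKey w = 0 ∨ pvKey w = 1 := by
  unfold pvKey
  cases w.toList with
  | nil => right; rfl
  | cons c t => dsimp only; split_ifs <;> simp

theorem foldlA_eq (words : List String) : ∀ (s1 s2 : List String),
    words.foldl (fun (acc : List String × List String) word =>
      match word.toList with
      | [] => acc
      | c :: _ =>
        if PySem.Chars.isalpha c then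
          if PySem.Chars.isupper c then (acc.1 ++ [word], acc.2)
          else (acc.1, acc.2 ++ [word])
        else acc) (s1, s2)
    = (s1 ++ words.filter pvUp, s2 ++ words.filter pvLow) := by
  induction words with
  | nil => intro s1 s2; simp
  | cons w ws ih =>
    intro s1 s2
    simp only [List.foldl_cons, List.filter_cons]
    cases hw : w.toList with
    | nil => simp [pvUp, pvLow, hw, ih]
    | cons c t =>
      by_cases ha : PySem.Chars.isalpha c
      · by_cases hu : PySem.Chars.isupper c
        · simp [pvUp, pvLow, hw, ha, hu, ih, List.append_assoc]
        · simp [pvUp, pvLow, hw, ha, hu, ih, List.append_assoc]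
      · simp [pvUp, pvLow, hw, ha, ih]

theorem insertBy_append (before : String → String → Bool) (x : String)
    (ups lows : List String)
    (h1 : ∀ y ∈ ups, before x y = false) (h2 : ∀ y ∈ lows, before x y = true) :
    PySem.List.insertBy before x (ups ++ lows) = ups ++ x :: lows := by
  induction ups with
  | nil =>
    cases lows with
    | nil => simp [PySem.List.insertBy]
    | cons l ls => simp [PySem.List.insertBy, h2 l (by simp)]
  | cons u us ih =>
    have hu : before x u = false := h1 u (by simp)
    simp only [List.cons_append, PySem.List.insertBy, hu]
    simp only [Bool.false_eq_true, if_false, List.cons.injEq, true_and]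
    exact ih (fun y hy => h1 y (by simp [hy]))

theorem sorted_binary (xs : List String) :
    PySem.List.sorted xs pvKey
      = xs.filter (fun w => pvKey w == 0) ++ xs.filter (fun w => !(pvKey w == 0)) := by
  rw [PySem.List.sorted_eq_foldl_insertBy]
  induction xs using List.reverseRecOn with
  | nil => simp
  | append_singleton ys x ih =>
    rw [List.foldl_append, List.foldl_cons, List.foldl_nil, ih]
    rcases pvKey_zero_or_one x with hx | hx
    · rw [insertBy_append]
      · simp [List.filter_append, hx, List.append_assoc]
      · intro y hy
        have := (List.mem_filter.mp hy).2
        simp only [beq_iff_eq] at this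
        simp [this, hx]
      · intro y hy
        have := (List.mem_filter.mp hy).2
        rcases pvKey_zero_or_one y with h | h <;> simp [h, hx] at this ⊢
    · rw [PySem.List.insertBy_of_forall_not_before]
      · simp [List.filter_append, hx, List.append_assoc]
      · intro y hy
        rcases pvKey_zero_or_one y with h | h <;> simp [h, hx]

theorem filter_up (ws : List String) :
    (ws.filter pvAlphaFirst).filter (fun w => pvKey w == 0) = ws.filter pvUp := by
  rw [List.filter_filter]
  apply List.filter_congr
  intro w _
  unfold pvAlphaFirst pvKey pvUp
  cases w.toList with
  | nil => rfl
  | cons c t => dsimp only; split_ifs with h <;> simp [h]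

theorem filter_low (ws : List String) :
    (ws.filter pvAlphaFirst).filter (fun w => !(pvKey w == 0)) = ws.filter pvLow := by
  rw [List.filter_filter]
  apply List.filter_congr
  intro w _
  unfold pvAlphaFirst pvKey pvLow
  cases w.toList with
  | nil => rfl
  | cons c t => dsimp only; split_ifs with h <;> simp [h]

-- ===== VERDICT (by name: the statement is the Claim_ definition above) =====
theorem capitals_first_spec : Claim_equal_capitals_first := by
  intro s _
  show capitals_first s = capitals_first_alt s
  unfold capitals_first capitals_first_alt
  dsimp only
  rw [foldlA_eq, sorted_binary, filter_up, filter_low]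
  simp
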